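-- pv_equiv track=rewrite | github.com/AshishHoodaIITD/competitive_coding | cdf650/e.py | findfeas
-- ===== SOURCE A (Python) =====
-- import heapq
--
-- def maxheappush(x,xx):
--     heapq.heapify(x)
--     heapq.heappush(x,-1*xx)
--
-- def maxheappop(x):
--     heapq.heapify(x)
--     ans = -1*heapq.heappop(x)
--     return ans
--
-- def findfeas(b,s):
--     c = []
--     heapq.heapify(c)
--     for bb in b:
--         maxheappush(c, bb)
--     ans = maxheappop(c)
--     while ans >= s[0]:
--         ans = ans - s[0]
--         s.pop(0)
--         maxheappush(c, ans)
--         ans = maxheappop(c)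
--         if len(s)==0: break
--     if len(s)==0:
--         return True
--     else:
--         return False
-- ===== SOURCE B (Python) =====
-- def _insert_sorted(arr, x):
--     # return a new list = sorted arr (ascending) with x inserted after all elements <= x
--     i = 0
--     while i < len(arr) and arr[i] <= x:
--         i += 1
--     return arr[:i] + [x] + arr[i:]
--
-- def findfeas(b, s):
--     # sorted-array simulation: keep the multiset as an ascending sorted list,
--     # the maximum is the last element; no heap at all, and s is only iterated.
--     arr = sorted(b)
--     for v in s:
--         m = arr[-1]
--         if m < v:
--             return False
--         arr = _insert_sorted(arr[:-1], m - v)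
--     return True
-- ===== Notes on version B (the rewrite author's own statement) =====
-- stated objective: alternative
-- what changed: B replaces the heap entirely by an ascending sorted array: sort b once, take the maximum as the last element, and re-insert the reduced value at its sorted position; s is iterated by element instead of being popped from the front.
-- crash fix: On empty s, A raises IndexError (reading s[0], or popping the empty heap when b is also empty); B returns True, the natural answer for an empty demand list. — e.g. on findfeas([1], []): A raises IndexError, B returns true
import Mathlib
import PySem

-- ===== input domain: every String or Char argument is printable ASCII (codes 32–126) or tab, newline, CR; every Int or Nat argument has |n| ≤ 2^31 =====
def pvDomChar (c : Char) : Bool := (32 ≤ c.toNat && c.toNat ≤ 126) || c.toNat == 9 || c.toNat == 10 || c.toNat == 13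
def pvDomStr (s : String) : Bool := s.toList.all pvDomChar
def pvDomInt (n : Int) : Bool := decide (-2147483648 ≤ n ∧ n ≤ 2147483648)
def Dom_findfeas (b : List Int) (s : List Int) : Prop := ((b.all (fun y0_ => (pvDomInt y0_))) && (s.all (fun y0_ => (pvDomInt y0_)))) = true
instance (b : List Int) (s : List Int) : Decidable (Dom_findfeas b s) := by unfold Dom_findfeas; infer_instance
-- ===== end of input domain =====

-- B drops the heap entirely: it keeps the multiset as an ascending SORTED ARRAY (max = last
-- element, re-insertion at the sorted position) and iterates s instead of popping its front;
-- A mutates its argument s in place (pops its front) while B does not — the equivalence proved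
-- here is about the RETURN value only.

-- heapq is modeled semantically: the heap is the list of stored values as a multiset; heapify is
-- the identity, heappush appends, and heappop removes the first occurrence of the minimum value.
-- This is exact for everything A observes (the popped values and the final Bool).
def popMin (h : List Int) : Option (Int × List Int) :=
  match PySem.List.min? h (fun x => x) with
  | none => none
  | some m => some (m, h.erase m)

-- ===== PORT A =====
def maxheappushA (x : List Int) (xx : Int) : List Int := x ++ [(-1) * xx]

def maxheappopA (x : List Int) : Option (Int × List Int) :=
  match popMin x with
  | none => none                      -- heappop of an empty heap: IndexError
  | some (m, r) => some ((-1) * m, r)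

def findfeasLoopA (c : List Int) (ans : Int) (s : List Int) : Bool :=
  match s with
  | [] => true                        -- len(s)==0 after the loop (or break): return True
  | s0 :: rest =>
    if ans ≥ s0 then
      let c2 := maxheappushA c (ans - s0)
      match maxheappopA c2 with
      | none => false                 -- unreachable: c2 is nonempty
      | some (ans2, c3) => findfeasLoopA c3 ans2 rest
    else false                        -- loop exits with s nonempty: return False

def findfeas (b : List Int) (s : List Int) : Bool :=
  let c := b.foldl maxheappushA []
  match maxheappopA c with
  | none => false                     -- b = []: Python raises IndexError (outside Pre_)
  | some (ans, c1) => findfeasLoopA c1 ans s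

-- ===== PORT B =====
-- _insert_sorted: linear scan for the insertion index, then arr[:i] + [x] + arr[i:]
def insIdxB (arr : List Int) (x : Int) : Nat :=
  match arr with
  | [] => 0
  | a :: t => if a ≤ x then insIdxB t x + 1 else 0

def insertSortedB (arr : List Int) (x : Int) : List Int :=
  let i := insIdxB arr x
  arr.take i ++ [x] ++ arr.drop i

def goB (arr : List Int) (s : List Int) : Bool :=
  match s with
  | [] => true
  | v :: rest =>
    match arr.getLast? with
    | none => false                   -- arr[-1] on empty arr: IndexError (outside Pre_)
    | some m =>
      if m < v then false
      else goB (insertSortedB arr.dropLast (m - v)) rest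

def findfeas_alt (b : List Int) (s : List Int) : Bool :=
  goB (PySem.List.sorted b (fun x => x) false) s

-- ===== PRECONDITION & SPEC =====
-- Python A raises IndexError when b = [] (pop from empty heap) or s = [] (s[0] in the while test).
def Pre_findfeas (b : List Int) (s : List Int) : Prop := b ≠ [] ∧ s ≠ []
instance (b : List Int) (s : List Int) : Decidable (Pre_findfeas b s) := by unfold Pre_findfeas; infer_instance
def pvWitness_findfeas : List Int × List Int := ([3, 1], [2, 2])

-- On empty s, A raises IndexError (reading s[0], or popping the empty heap when b is also empty); B returns True.
def Raises_findfeas (b : List Int) (s : List Int) : Prop := s = []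
instance (b : List Int) (s : List Int) : Decidable (Raises_findfeas b s) := by unfold Raises_findfeas; infer_instance
def pvRaiseWitness_findfeas : List Int × List Int := ([1], [])
def pvRaiseWitnessOut_findfeas : Bool := true

def Spec_findfeas (b : List Int) (s : List Int) (out : Bool) : Prop := out = findfeas_alt b s
instance (b : List Int) (s : List Int) (out : Bool) : Decidable (Spec_findfeas b s out) := by unfold Spec_findfeas; infer_instance

-- ===== CLAIM =====
def Claim_equal_findfeas : Prop := ∀ (b : List Int) (s : List Int), Dom_findfeas b s → Pre_findfeas b s → Spec_findfeas b s (findfeas b s)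
def Claim_raises_findfeas : Prop := (∀ (b : List Int) (s : List Int), Dom_findfeas b s → Raises_findfeas b s → ¬ Pre_findfeas b s) ∧ (Dom_findfeas (pvRaiseWitness_findfeas.1) (pvRaiseWitness_findfeas.2) ∧ Raises_findfeas (pvRaiseWitness_findfeas.1) (pvRaiseWitness_findfeas.2) ∧ findfeas_alt (pvRaiseWitness_findfeas.1) (pvRaiseWitness_findfeas.2) = pvRaiseWitnessOut_findfeas)

-- ===== LEMMAS AND PROOFS =====
-- insertSortedB (linear index scan + take/drop splice) equals the structural ordered insertion.
def insRec (arr : List Int) (x : Int) : List Int :=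
  match arr with
  | [] => [x]
  | a :: t => if a ≤ x then a :: insRec t x else x :: a :: t

theorem insertSortedB_eq_insRec (arr : List Int) (x : Int) :
    insertSortedB arr x = insRec arr x := by
  induction arr with
  | nil => rfl
  | cons a t ih =>
    by_cases h : a ≤ x
    · simp [insertSortedB, insRec, insIdxB, h] at ih ⊢; exact ih
    · simp [insertSortedB, insRec, insIdxB, h]

theorem insRec_perm (arr : List Int) (x : Int) : (insRec arr x).Perm (x :: arr) := by
  induction arr with
  | nil => simp [insRec]
  | cons a t ih =>
    by_cases h : a ≤ x
    · simp only [insRec, if_pos h]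
      exact (ih.cons a).trans (List.Perm.swap x a t)
    · simp [insRec, h]

theorem insRec_mem {arr : List Int} {x y : Int} (hy : y ∈ insRec arr x) : y = x ∨ y ∈ arr := by
  have := (insRec_perm arr x).mem_iff.mp hy
  simpa using this

theorem insRec_sorted {arr : List Int} (x : Int) (h : arr.Pairwise (· ≤ ·)) :
    (insRec arr x).Pairwise (· ≤ ·) := by
  induction arr with
  | nil => simp [insRec]
  | cons a t ih =>
    rcases List.pairwise_cons.mp h with ⟨ha, ht⟩
    by_cases hax : a ≤ x
    · simp only [insRec, if_pos hax]
      refine List.pairwise_cons.mpr ⟨?_, ih ht⟩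
      intro y hy
      rcases insRec_mem hy with rfl | hyt
      · exact hax
      · exact ha y hyt
    · simp only [insRec, if_neg hax]
      refine List.pairwise_cons.mpr ⟨?_, h⟩
      intro y hy
      rcases List.mem_cons.mp hy with rfl | hyt
      · omega
      · exact le_trans (by omega) (ha y hyt)

theorem insRec_ne_nil (arr : List Int) (x : Int) : insRec arr x ≠ [] := by
  cases arr with
  | nil => simp [insRec]
  | cons a t => by_cases h : a ≤ x <;> simp [insRec, h]

-- A's heap after the build loop is exactly the negated b.
theorem foldl_push_eq_map (b : List Int) (acc : List Int) :
    b.foldl maxheappushA acc = acc ++ b.map (fun x => -x) := by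
  induction b generalizing acc with
  | nil => simp
  | cons x t ih => simp [maxheappushA, ih]

-- popping the heap corresponds to taking the last element of the sorted array
theorem pop_corr {arr h : List Int} {m : Int}
    (hs : arr.Pairwise (· ≤ ·)) (hl : arr.getLast? = some m)
    (hp : h.Perm (arr.map (fun x => -x))) :
    popMin h = some (-m, h.erase (-m)) ∧
      (h.erase (-m)).Perm (arr.dropLast.map (fun x => -x)) := by
  have hne : arr ≠ [] := by intro e; simp [e] at hl
  have harr : arr.dropLast ++ [m] = arr := by
    have h2 := List.dropLast_append_getLast hne
    have h3 : arr.getLast? = some (arr.getLast hne) := List.getLast?_eq_some_getLast hne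
    rw [h3] at hl
    rw [Option.some_inj.mp hl] at h2
    exact h2
  have ub : ∀ a ∈ arr, a ≤ m := by
    intro a hax
    rw [← harr] at hs hax
    rcases List.pairwise_append.mp hs with ⟨_, _, hcross⟩
    rcases List.mem_append.mp hax with hdl | hm
    · exact hcross a hdl m (List.mem_singleton_self m)
    · simp at hm; omega
  have hmmem : m ∈ arr := by rw [← harr]; exact List.mem_append_right _ (List.mem_singleton_self m)
  have hnegm : -m ∈ h := hp.mem_iff.mpr (List.mem_map.mpr ⟨m, hmmem, rfl⟩)
  -- the min of h is -m
  have hmin : PySem.List.min? h (fun x => x) = some (-m) := by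
    cases hq : PySem.List.min? h (fun x => x) with
    | none =>
      have := (PySem.List.min?_eq_none_iff h (fun x => x)).mp hq
      rw [this] at hnegm; simp at hnegm
    | some mv =>
      have hmem := PySem.List.min?_mem hq
      have hisMin := PySem.List.min?_isMin hq
      have h1 : mv ≤ -m := hisMin _ hnegm
      have h2 : -m ≤ mv := by
        rcases List.mem_map.mp (hp.mem_iff.mp hmem) with ⟨a, hax, rfl⟩
        have := ub a hax; omega
      have : mv = -m := le_antisymm h1 h2
      rw [this]
  constructor
  · simp [popMin, hmin]
  · have e1 : (h.erase (-m)).Perm ((arr.map (fun x => -x)).erase (-m)) := hp.erase (-m)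
    have e2 : arr.map (fun x => -x) = arr.dropLast.map (fun x => -x) ++ [-m] := by
      rw [← harr]; simp
    have e3 : ((arr.dropLast.map (fun x => -x) ++ [-m]).erase (-m)).Perm
        (arr.dropLast.map (fun x => -x)) := by
      have hperm := (List.perm_append_singleton (-m) (arr.dropLast.map (fun x => -x))).erase (-m)
      rw [List.erase_cons_head] at hperm
      exact hperm
    rw [e2] at e1
    exact e1.trans e3

-- Invariant: A's loop, started just after popping the max m, computes B's loop on the sorted array.
theorem loopA_eq_goB (s : List Int) : ∀ (arr c : List Int) (m : Int),
    arr.Pairwise (· ≤ ·) → arr.getLast? = some m →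
    c.Perm (arr.dropLast.map (fun x => -x)) →
    findfeasLoopA c m s = goB arr s := by
  induction s with
  | nil => intro arr c m _ _ _; simp [findfeasLoopA, goB]
  | cons v rest ih =>
    intro arr c m hs hl hc
    simp only [findfeasLoopA, goB, hl]
    by_cases hcmp : m ≥ v
    · rw [if_pos hcmp, if_neg (by omega)]
      set arr' := insertSortedB arr.dropLast (m - v) with harr'
      have harr'rec : arr' = insRec arr.dropLast (m - v) := insertSortedB_eq_insRec _ _
      have hs' : arr'.Pairwise (· ≤ ·) := by
        rw [harr'rec]
        exact insRec_sorted _ (hs.sublist (List.dropLast_sublist arr))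
      have hne' : arr' ≠ [] := by rw [harr'rec]; exact insRec_ne_nil _ _
      obtain ⟨m', hl'⟩ : ∃ m', arr'.getLast? = some m' := by
        cases hq : arr'.getLast? with
        | none => exact absurd (List.getLast?_eq_none_iff.mp hq) hne'
        | some x => exact ⟨x, rfl⟩
      have hc2 : (maxheappushA c (m - v)).Perm (arr'.map (fun x => -x)) := by
        have p1 : (maxheappushA c (m - v)).Perm (-(m - v) :: c) := by
          simp only [maxheappushA, neg_one_mul]
          exact List.perm_append_singleton (-(m - v)) c
        have p2 : (-(m - v) :: c).Perm (-(m - v) :: arr.dropLast.map (fun x => -x)) := hc.cons _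
        have p3 : (arr'.map (fun x => -x)).Perm (-(m - v) :: arr.dropLast.map (fun x => -x)) := by
          rw [harr'rec]
          simpa using (insRec_perm arr.dropLast (m - v)).map (fun x => -x)
        exact (p1.trans p2).trans p3.symm
      obtain ⟨hpop, hperm'⟩ := pop_corr hs' hl' hc2
      simp only [maxheappopA, hpop]
      have : (-1 : Int) * -m' = m' := by ring
      rw [this]
      exact ih arr' _ m' hs' hl' hperm'
    · rw [if_neg hcmp, if_pos (by omega)]

-- ===== VERDICT =====
theorem findfeas_spec : Claim_equal_findfeas := by
  intro b s _ hpre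
  unfold Spec_findfeas findfeas findfeas_alt
  set arr := PySem.List.sorted b (fun x => x) false with harrdef
  have hperm_b : arr.Perm b := PySem.List.sorted_perm b (fun x => x) false
  have hs : arr.Pairwise (· ≤ ·) := PySem.List.sorted_pairwise b (fun x => x)
  have hne : arr ≠ [] := by
    intro e
    exact hpre.1 (List.Perm.nil_eq (e ▸ hperm_b)).symm
  obtain ⟨m, hl⟩ : ∃ m, arr.getLast? = some m := by
    cases hq : arr.getLast? with
    | none => exact absurd (List.getLast?_eq_none_iff.mp hq) hne
    | some x => exact ⟨x, rfl⟩
  have hcmap : (b.foldl maxheappushA []).Perm (arr.map (fun x => -x)) := by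
    rw [foldl_push_eq_map b []]
    simpa using (hperm_b.symm.map (fun x => -x))
  obtain ⟨hpop, hperm'⟩ := pop_corr hs hl hcmap
  simp only [hpop, maxheappopA]
  have : (-1 : Int) * -m = m := by ring
  rw [this]
  exact loopA_eq_goB s arr _ m hs hl hperm'

def findfeas_raises : Claim_raises_findfeas := by
  unfold Claim_raises_findfeas
  exact ⟨fun b s _ hr hpre => hpre.2 hr, by decide⟩
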